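-- pv_equiv track=rewrite | github.com/jun-inoue/ORTHOSCOPE_STAR | orthoscope_star_v1.1.7_mod2_ji.py | codonSepalate
-- ===== SOURCE A (Python) =====
-- from collections import OrderedDict
--
-- def codonSepalate(recs):
--     recs1 = OrderedDict()
--     recs2 = OrderedDict()
--     recs3 = OrderedDict()
--     for name, sec in recs.items():
--         recs1[name] = ""
--         recs2[name] = ""
--         recs3[name] = ""
--         for i in range(len(sec)):
--             if   i%3 == 0:
--                recs1[name] += sec[i]
--             elif i%3 == 1:
--                recs2[name] += sec[i]
--             else:
--                recs3[name] += sec[i]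
--     return recs1, recs2, recs3
-- ===== SOURCE B (Python) =====
-- from collections import OrderedDict
--
-- def codonSepalate(recs):
--     recs1 = OrderedDict()
--     recs2 = OrderedDict()
--     recs3 = OrderedDict()
--     for name, sec in recs.items():
--         firsts = []
--         seconds = []
--         thirds = []
--         for i in range(0, len(sec), 3):
--             firsts.append(sec[i])
--             seconds.append(sec[i + 1:i + 2])
--             thirds.append(sec[i + 2:i + 3])
--         recs1[name] = "".join(firsts)
--         recs2[name] = "".join(seconds)
--         recs3[name] = "".join(thirds)
--     return recs1, recs2, recs3
-- ===== Notes on version B (the rewrite author's own statement) =====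
-- stated objective: alternative
-- what changed: Replaces the per-character loop with i%3 three-way dispatch and string += on dict entries by a per-codon stride loop that collects the three phases into lists (slices guard the partial last codon) and joins each list once per record.
import Mathlib
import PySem

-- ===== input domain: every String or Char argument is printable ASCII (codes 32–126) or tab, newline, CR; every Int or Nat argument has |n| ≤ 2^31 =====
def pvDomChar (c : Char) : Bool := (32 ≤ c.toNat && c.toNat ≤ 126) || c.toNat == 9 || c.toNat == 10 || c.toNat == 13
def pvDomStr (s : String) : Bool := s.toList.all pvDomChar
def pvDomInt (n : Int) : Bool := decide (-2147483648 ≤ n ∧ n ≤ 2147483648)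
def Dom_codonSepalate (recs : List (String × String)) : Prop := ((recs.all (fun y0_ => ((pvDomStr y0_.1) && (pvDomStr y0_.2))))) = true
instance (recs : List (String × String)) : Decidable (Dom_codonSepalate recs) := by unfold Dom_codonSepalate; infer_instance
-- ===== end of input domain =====

-- B replaces A's per-character loop (i%3 dispatch, string += on dict entries) by a per-codon
-- stride loop collecting the three phases into lists (slices guard the partial last codon),
-- joined once per record: a different decomposition of the same O(n) task.

-- shared idiom: Python's 1-character string sec[i] (both ports index only in range, where pyGet? is some)
def pvCharAt (sec : String) (i : Int) : String :=
  (PySem.Str.pyGet? sec i).elim "" (fun c => String.ofList [c])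

-- ===== PORT A =====
def codonSepalate (recs : List (String × String)) : (List (String × String)) × (List (String × String)) × (List (String × String)) :=
  let st := recs.foldl
    (fun (st : PySem.Dict String String × PySem.Dict String String × PySem.Dict String String) nv =>
      let name := nv.1
      let sec := nv.2
      let d1 := st.1.insert name ""
      let d2 := st.2.1.insert name ""
      let d3 := st.2.2.insert name ""
      (PySem.List.pyRange 0 (PySem.Str.len sec) 1).foldl
        (fun st2 i =>
          if PySem.Int.mod i 3 = 0 then
            (st2.1.insert name (st2.1.getD name "" ++ pvCharAt sec i), st2.2.1, st2.2.2)
          else if PySem.Int.mod i 3 = 1 then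
            (st2.1, st2.2.1.insert name (st2.2.1.getD name "" ++ pvCharAt sec i), st2.2.2)
          else
            (st2.1, st2.2.1, st2.2.2.insert name (st2.2.2.getD name "" ++ pvCharAt sec i)))
        (d1, d2, d3))
    (⟨[]⟩, ⟨[]⟩, ⟨[]⟩)
  (st.1.items, st.2.1.items, st.2.2.items)

-- ===== PORT B =====
def codonSepalate_alt (recs : List (String × String)) : (List (String × String)) × (List (String × String)) × (List (String × String)) :=
  let st := recs.foldl
    (fun (st : PySem.Dict String String × PySem.Dict String String × PySem.Dict String String) nv =>
      let name := nv.1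
      let sec := nv.2
      let parts := (PySem.List.pyRange 0 (PySem.Str.len sec) 3).foldl
        (fun (p : List String × List String × List String) i =>
          (p.1 ++ [pvCharAt sec i],
           p.2.1 ++ [PySem.Str.slice sec (some (i + 1)) (some (i + 2))],
           p.2.2 ++ [PySem.Str.slice sec (some (i + 2)) (some (i + 3))]))
        ([], [], [])
      (st.1.insert name (PySem.Str.join "" parts.1),
       st.2.1.insert name (PySem.Str.join "" parts.2.1),
       st.2.2.insert name (PySem.Str.join "" parts.2.2)))
    (⟨[]⟩, ⟨[]⟩, ⟨[]⟩)
  (st.1.items, st.2.1.items, st.2.2.items)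

-- ===== PRECONDITION & SPEC =====
def Spec_codonSepalate (recs : List (String × String)) (out : (List (String × String)) × (List (String × String)) × (List (String × String))) : Prop := out = codonSepalate_alt recs
instance (recs : List (String × String)) (out : (List (String × String)) × (List (String × String)) × (List (String × String))) : Decidable (Spec_codonSepalate recs out) := by unfold Spec_codonSepalate; infer_instance

-- ===== CLAIM (what is proved, stated in full; the proofs are below) =====
def Claim_equal_codonSepalate : Prop := ∀ (recs : List (String × String)), Dom_codonSepalate recs → Spec_codonSepalate recs (codonSepalate recs)

-- ===== LEMMAS AND PROOFS =====

theorem pvIntercalate_nil {α : Type} (l : List (List α)) :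
    ([] : List α).intercalate l = l.flatten := by
  induction l with
  | nil => simp [List.intercalate]
  | cons x t ih => cases t <;> simp_all [List.intercalate, List.intersperse]

theorem pvJoin_nil : PySem.Str.join "" ([] : List String) = "" := by
  apply String.toList_inj.mp
  simp [PySem.Str.join, PySem.Chars.join, pvIntercalate_nil]

theorem pvJoin_cons (x : String) (xs : List String) :
    PySem.Str.join "" (x :: xs) = x ++ PySem.Str.join "" xs := by
  apply String.toList_inj.mp
  simp [PySem.Str.join, PySem.Chars.join, pvIntercalate_nil]

theorem pvRange_nil {a b s : Int} (hs : 0 < s) (h : b ≤ a) :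
    PySem.List.pyRange a b s = [] := by
  rw [PySem.List.pyRange_of_pos a b hs]
  simp [show ¬ a < b by omega]

theorem pvRange3_cons {a b : Int} (h : a < b) :
    PySem.List.pyRange a b 3 = a :: PySem.List.pyRange (a + 3) b 3 := by
  rw [PySem.List.pyRange_of_pos a b (by norm_num), PySem.List.pyRange_of_pos (a + 3) b (by norm_num)]
  by_cases h3 : a + 3 < b
  · rw [if_pos h, if_pos h3]
    have hc : ((b - a + 3 - 1) / 3).toNat = ((b - (a + 3) + 3 - 1) / 3).toNat + 1 := by omega
    rw [hc, List.range_succ_eq_map]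
    simp only [List.map_cons, List.map_map, Nat.cast_zero]
    refine congrArg₂ _ (by push_cast; ring) (List.map_congr_left ?_)
    intro k _
    simp only [Function.comp_apply]
    push_cast
    ring
  · rw [if_pos h, if_neg h3]
    have hc : ((b - a + 3 - 1) / 3).toNat = 1 := by omega
    rw [hc]
    simp

theorem pvCharAt_lt (sec : String) (i : Nat) (h : i < sec.toList.length) :
    pvCharAt sec (i : Int) = String.ofList [sec.toList[i]] := by
  simp [pvCharAt, List.getElem?_eq_getElem h]

theorem pvCharAt_ge (sec : String) (i : Nat) (h : sec.toList.length ≤ i) :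
    pvCharAt sec (i : Int) = "" := by
  simp [pvCharAt, List.getElem?_eq_none_iff.mpr h]

-- sec[i:i+1] = the 1-char idiom, for every i (both are "" past the end)
theorem pvSlice_one (sec : String) (i : Nat) :
    PySem.Str.slice sec (some (i : Int)) (some ((i : Int) + 1)) = pvCharAt sec (i : Int) := by
  apply String.toList_inj.mp
  have hs : ((i : Int) + 1) = ((i : Int) + ((1 : Nat) : Int)) := by norm_num
  rw [PySem.Str.slice]
  simp only [String.toList_ofList, PySem.Chars.slice_eq_listSlice, hs,
    PySem.List.slice_natCast_add]
  by_cases h : i < sec.toList.length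
  · rw [pvCharAt_lt sec i h, List.drop_eq_getElem_cons h,
      (rfl : (1 : Nat) = 0 + 1), List.take_succ_cons, List.take_zero]
    simp
  · rw [List.drop_eq_nil_iff.mpr (by omega), pvCharAt_ge sec i (by omega)]
    simp

theorem pvGetD_insert_self (d : PySem.Dict String String) (k : String) (v : String) :
    (d.insert k v).getD k "" = v := by
  rw [PySem.Dict.getD_insert]
  simp

theorem pvInner (sec name : String) :
    ∀ (m a : Nat), sec.toList.length ≤ a + m → a % 3 = 0 →
    ∀ (d1 d2 d3 : PySem.Dict String String) (s1 s2 s3 : String),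
    (PySem.List.pyRange (a : Int) (PySem.Str.len sec) 1).foldl
        (fun st2 i =>
          if PySem.Int.mod i 3 = 0 then
            (st2.1.insert name (st2.1.getD name "" ++ pvCharAt sec i), st2.2.1, st2.2.2)
          else if PySem.Int.mod i 3 = 1 then
            (st2.1, st2.2.1.insert name (st2.2.1.getD name "" ++ pvCharAt sec i), st2.2.2)
          else
            (st2.1, st2.2.1, st2.2.2.insert name (st2.2.2.getD name "" ++ pvCharAt sec i)))
        (d1.insert name s1, d2.insert name s2, d3.insert name s3)
    = (d1.insert name (s1 ++ PySem.Str.join "" (((PySem.List.pyRange (a : Int) (PySem.Str.len sec) 3)).map (fun i => pvCharAt sec i))),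
       d2.insert name (s2 ++ PySem.Str.join "" (((PySem.List.pyRange (a : Int) (PySem.Str.len sec) 3)).map (fun i => PySem.Str.slice sec (some (i + 1)) (some (i + 2))))),
       d3.insert name (s3 ++ PySem.Str.join "" (((PySem.List.pyRange (a : Int) (PySem.Str.len sec) 3)).map (fun i => PySem.Str.slice sec (some (i + 2)) (some (i + 3)))))) := by
  intro m
  induction m with
  | zero =>
    intro a hle h3 d1 d2 d3 s1 s2 s3
    rw [PySem.Str.len_eq,
      pvRange_nil (by norm_num) (by exact_mod_cast hle),
      pvRange_nil (by norm_num) (by exact_mod_cast hle)]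
    simp [pvJoin_nil]
  | succ m ih =>
    intro a hle h3 d1 d2 d3 s1 s2 s3
    by_cases hab : a < sec.toList.length
    case neg =>
      rw [PySem.Str.len_eq,
        pvRange_nil (by norm_num) (by exact_mod_cast (by omega : sec.toList.length ≤ a)),
        pvRange_nil (by norm_num) (by exact_mod_cast (by omega : sec.toList.length ≤ a))]
      simp [pvJoin_nil]
    case pos =>
      have hlen : PySem.Str.len sec = (sec.toList.length : Int) := PySem.Str.len_eq sec
      have hlt : (a : Int) < PySem.Str.len sec := by rw [hlen]; exact_mod_cast hab
      have hm0 : PySem.Int.mod (a : Int) 3 = ((a % 3 : Nat) : Int) := by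
        exact_mod_cast PySem.Int.mod_natCast a 3
      have hm1 : PySem.Int.mod ((a : Int) + 1) 3 = (((a + 1) % 3 : Nat) : Int) := by
        exact_mod_cast PySem.Int.mod_natCast (a + 1) 3
      have hm2 : PySem.Int.mod ((a : Int) + 1 + 1) 3 = (((a + 2) % 3 : Nat) : Int) := by
        have : ((a : Int) + 1 + 1) = ((a + 2 : Nat) : Int) := by push_cast; ring
        rw [this]
        exact_mod_cast PySem.Int.mod_natCast (a + 2) 3
      -- RHS: peel one codon
      rw [pvRange3_cons hlt]
      simp only [List.map_cons, pvJoin_cons]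
      -- LHS: peel position a
      rw [PySem.List.pyRange_one_cons hlt, List.foldl_cons]
      rw [if_pos (by rw [hm0, h3]; norm_num)]
      rw [pvGetD_insert_self, PySem.Dict.insert_insert_self]
      by_cases h1 : a + 1 < sec.toList.length
      case neg =>
        -- sec ends right after position a
        rw [pvRange_nil (s := 1) (by norm_num) (by rw [hlen]; exact_mod_cast (by omega : sec.toList.length ≤ a + 1))]
        rw [pvRange_nil (s := 3) (by norm_num) (by rw [hlen]; exact_mod_cast (by omega : sec.toList.length ≤ a + 3))]
        have e2 : PySem.Str.slice sec (some ((a : Int) + 1)) (some ((a : Int) + 2)) = "" := by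
          have h' : ((a : Int) + 1) = ((a + 1 : Nat) : Int) := by push_cast; ring
          have h'' : ((a : Int) + 2) = (((a + 1 : Nat) : Int) + 1) := by push_cast; ring
          rw [h', h'', pvSlice_one, pvCharAt_ge sec (a + 1) (by omega)]
        have e3 : PySem.Str.slice sec (some ((a : Int) + 2)) (some ((a : Int) + 3)) = "" := by
          have h' : ((a : Int) + 2) = ((a + 2 : Nat) : Int) := by push_cast; ring
          have h'' : ((a : Int) + 3) = (((a + 2 : Nat) : Int) + 1) := by push_cast; ring
          rw [h', h'', pvSlice_one, pvCharAt_ge sec (a + 2) (by omega)]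
        rw [e2, e3]
        simp [pvJoin_nil]
      case pos =>
        have hlt1 : (a : Int) + 1 < PySem.Str.len sec := by rw [hlen]; exact_mod_cast h1
        rw [PySem.List.pyRange_one_cons hlt1, List.foldl_cons]
        rw [if_neg (by rw [hm1, (by omega : (a + 1) % 3 = 1)]; norm_num),
            if_pos (by rw [hm1, (by omega : (a + 1) % 3 = 1)]; norm_num)]
        rw [pvGetD_insert_self, PySem.Dict.insert_insert_self]
        have e2 : PySem.Str.slice sec (some ((a : Int) + 1)) (some ((a : Int) + 2)) = pvCharAt sec ((a : Int) + 1) := by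
          have h' : ((a : Int) + 1) = ((a + 1 : Nat) : Int) := by push_cast; ring
          have h'' : ((a : Int) + 2) = (((a + 1 : Nat) : Int) + 1) := by push_cast; ring
          rw [h', h'', pvSlice_one]
        by_cases h2 : a + 2 < sec.toList.length
        case neg =>
          rw [pvRange_nil (s := 1) (by norm_num) (by rw [hlen]; exact_mod_cast (by omega : sec.toList.length ≤ a + 1 + 1))]
          rw [pvRange_nil (s := 3) (by norm_num) (by rw [hlen]; exact_mod_cast (by omega : sec.toList.length ≤ a + 3))]
          have e3 : PySem.Str.slice sec (some ((a : Int) + 2)) (some ((a : Int) + 3)) = "" := by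
            have h' : ((a : Int) + 2) = ((a + 2 : Nat) : Int) := by push_cast; ring
            have h'' : ((a : Int) + 3) = (((a + 2 : Nat) : Int) + 1) := by push_cast; ring
            rw [h', h'', pvSlice_one, pvCharAt_ge sec (a + 2) (by omega)]
          rw [e2, e3]
          simp [pvJoin_nil]
        case pos =>
          have hlt2 : (a : Int) + 1 + 1 < PySem.Str.len sec := by rw [hlen]; push_cast; omega
          rw [PySem.List.pyRange_one_cons hlt2, List.foldl_cons]
          rw [if_neg (by rw [hm2, (by omega : (a + 2) % 3 = 2)]; norm_num),
              if_neg (by rw [hm2, (by omega : (a + 2) % 3 = 2)]; norm_num)]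
          rw [pvGetD_insert_self, PySem.Dict.insert_insert_self]
          have hstep : ((a : Int) + 1 + 1 + 1) = (((a + 3 : Nat) : Int)) := by push_cast; ring
          rw [hstep]
          rw [ih (a + 3) (by omega) (by omega)]
          have e3 : PySem.Str.slice sec (some ((a : Int) + 2)) (some ((a : Int) + 3)) = pvCharAt sec ((a : Int) + 2) := by
            have h' : ((a : Int) + 2) = ((a + 2 : Nat) : Int) := by push_cast; ring
            have h'' : ((a : Int) + 3) = (((a + 2 : Nat) : Int) + 1) := by push_cast; ring
            rw [h', h'', pvSlice_one]
          have hcast3 : (((a + 3 : Nat) : Int)) = (a : Int) + 3 := by push_cast; ring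
          rw [e2, e3, hcast3, (by ring : ((a : Int) + 1 + 1) = (a : Int) + 2)]
          simp [String.append_assoc]

theorem pvOuter (recs : List (String × String))
    (d1 d2 d3 : PySem.Dict String String) :
    recs.foldl
      (fun (st : PySem.Dict String String × PySem.Dict String String × PySem.Dict String String) nv =>
        let name := nv.1
        let sec := nv.2
        let e1 := st.1.insert name ""
        let e2 := st.2.1.insert name ""
        let e3 := st.2.2.insert name ""
        (PySem.List.pyRange 0 (PySem.Str.len sec) 1).foldl
          (fun st2 i =>
            if PySem.Int.mod i 3 = 0 then
              (st2.1.insert name (st2.1.getD name "" ++ pvCharAt sec i), st2.2.1, st2.2.2)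
            else if PySem.Int.mod i 3 = 1 then
              (st2.1, st2.2.1.insert name (st2.2.1.getD name "" ++ pvCharAt sec i), st2.2.2)
            else
              (st2.1, st2.2.1, st2.2.2.insert name (st2.2.2.getD name "" ++ pvCharAt sec i)))
          (e1, e2, e3)) (d1, d2, d3)
    = recs.foldl
      (fun (st : PySem.Dict String String × PySem.Dict String String × PySem.Dict String String) nv =>
        let name := nv.1
        let sec := nv.2
        let parts := (PySem.List.pyRange 0 (PySem.Str.len sec) 3).foldl
          (fun (p : List String × List String × List String) i =>
            (p.1 ++ [pvCharAt sec i],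
             p.2.1 ++ [PySem.Str.slice sec (some (i + 1)) (some (i + 2))],
             p.2.2 ++ [PySem.Str.slice sec (some (i + 2)) (some (i + 3))]))
          ([], [], [])
        (st.1.insert name (PySem.Str.join "" parts.1),
         st.2.1.insert name (PySem.Str.join "" parts.2.1),
         st.2.2.insert name (PySem.Str.join "" parts.2.2))) (d1, d2, d3) := by
  induction recs generalizing d1 d2 d3 with
  | nil => rfl
  | cons nv rest ih =>
    simp only [List.foldl_cons]
    rw [PySem.List.foldl_prod_mk
          (fun s e => s ++ [pvCharAt nv.2 e])
          (fun (s : List String × List String) e =>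
            (s.1 ++ [PySem.Str.slice nv.2 (some (e + 1)) (some (e + 2))],
             s.2 ++ [PySem.Str.slice nv.2 (some (e + 2)) (some (e + 3))]))]
    rw [PySem.List.foldl_prod_mk
          (fun s e => s ++ [PySem.Str.slice nv.2 (some (e + 1)) (some (e + 2))])
          (fun s e => s ++ [PySem.Str.slice nv.2 (some (e + 2)) (some (e + 3))])]
    rw [PySem.List.foldl_append_singleton_eq_map (fun e => pvCharAt nv.2 e),
        PySem.List.foldl_append_singleton_eq_map
          (fun e => PySem.Str.slice nv.2 (some (e + 1)) (some (e + 2))),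
        PySem.List.foldl_append_singleton_eq_map
          (fun e => PySem.Str.slice nv.2 (some (e + 2)) (some (e + 3)))]
    have h0 := pvInner nv.2 nv.1 nv.2.toList.length 0 (by omega) (by omega) d1 d2 d3 "" "" ""
    rw [Nat.cast_zero] at h0
    rw [h0]
    simp only [List.nil_append, String.empty_append]
    exact ih _ _ _

-- ===== VERDICT (by name: the statement is the Claim_ definition above) =====
theorem codonSepalate_spec : Claim_equal_codonSepalate := by
  intro recs _
  unfold Spec_codonSepalate codonSepalate codonSepalate_alt
  rw [pvOuter]
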